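-- pv_equiv track=rewrite | github.com/ASSERT-KTH/Mokav | experiments/c4b/BADTI/iteration-10-sample-1-temp-0/generated_tests/1102/61918/temp_acc_qb.py | patched_func
-- ===== SOURCE A (Python) =====
-- def patched_func(*args):
-- 	global_list = []
--
-- 	s = args[0]
-- 	l = list(s.lower())
-- 	k = list(s.lower())
-- 	v = ['a', 'o', 'y', 'e', 'u', 'i']
-- 	count = 0
-- 	for i in range(len(l)):
-- 	    if (l[i] in v):
-- 	        k.remove(l[i])
-- 	        count = (count - 1)
-- 	    else:
-- 	        k.insert((i + count), '.')
-- 	        count = (count + 1)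
-- 	s2 = ''.join(k)
-- 	global_list.append(s2)
-- 	return global_list
-- ===== SOURCE B (Python) =====
-- def patched_func(*args):
--     s = args[0]
--     low = s.lower()
--     table = {}
--     for c in set(low):
--         table[ord(c)] = None if c in 'aoyeui' else '.' + c
--     return [low.translate(table)]
-- ===== Notes on version B (the rewrite author's own statement) =====
-- stated objective: faster
-- what changed: A's per-index loop mutating the list with offset-tracked remove/insert (each a linear shift) is replaced by building a per-character translation table from the string's distinct characters and doing one table-driven translate pass.
import Mathlib
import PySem

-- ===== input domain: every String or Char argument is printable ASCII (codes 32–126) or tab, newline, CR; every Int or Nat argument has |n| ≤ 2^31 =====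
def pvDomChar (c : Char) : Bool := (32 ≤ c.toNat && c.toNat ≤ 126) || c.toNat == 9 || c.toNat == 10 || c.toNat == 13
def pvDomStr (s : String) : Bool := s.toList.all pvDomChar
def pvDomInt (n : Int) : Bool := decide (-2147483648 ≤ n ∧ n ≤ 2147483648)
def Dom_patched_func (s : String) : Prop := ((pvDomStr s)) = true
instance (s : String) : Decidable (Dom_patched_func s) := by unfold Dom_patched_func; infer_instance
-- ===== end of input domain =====

-- B replaces A's offset-tracked remove/insert loop by a translation table built from the
-- string's distinct characters followed by one table-driven pass (objective: faster; A shifts the list on every remove/insert).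

-- ===== PORT A =====
-- the loop body of A's 'for i in range(len(l))', state = (k, count)
def pvStepA (l : List Char) (st : List Char × Int) (i : Int) : List Char × Int :=
  let k := st.1
  let count := st.2
  match PySem.List.pyGet? l i with
  | none => st
  | some c =>
    if c ∈ ['a', 'o', 'y', 'e', 'u', 'i'] then
      ((PySem.List.remove? k c).getD k, count - 1)
    else
      (PySem.List.insert k (i + count) '.', count + 1)

def patched_func (s : String) : List String :=
  let l := (PySem.Str.lower s).toList
  let k := (PySem.Str.lower s).toList
  let st := (PySem.List.pyRange 0 (l.length : Int) 1).foldl (pvStepA l) (k, 0)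
  [String.mk st.1]

-- ===== PORT B =====
-- B's table-building loop: for c in set(low): table[c] = None if vowel else '.'+c
def pvTableB (low : List Char) : PySem.Dict Char (Option (List Char)) :=
  (PySem.Set.ofList low).foldl
    (fun d c =>
      d.insert c (if c ∈ ['a', 'o', 'y', 'e', 'u', 'i'] then none else some ['.', c]))
    PySem.Dict.empty

-- low.translate(table): per char, absent key keeps the char, None deletes, a string replaces
def pvTranslateB (table : PySem.Dict Char (Option (List Char))) (low : List Char) : List Char :=
  low.foldl
    (fun acc c =>
      match table.get? c with
      | none => acc ++ [c]
      | some none => acc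
      | some (some r) => acc ++ r)
    []

def patched_func_alt (s : String) : List String :=
  let low := (PySem.Str.lower s).toList
  [String.mk (pvTranslateB (pvTableB low) low)]

-- ===== PRECONDITION & SPEC =====
def Spec_patched_func (s : String) (out : List String) : Prop := out = patched_func_alt s
instance (s : String) (out : List String) : Decidable (Spec_patched_func s out) := by unfold Spec_patched_func; infer_instance

-- ===== CLAIM (what is proved, stated in full; the proofs are below) =====
def Claim_equal_patched_func : Prop := ∀ (s : String), Dom_patched_func s → Spec_patched_func s (patched_func s)

-- ===== LEMMAS AND PROOFS =====

-- the common value: drop vowels, dot-prefix everything else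
def pvF (c : Char) : List Char :=
  if c ∈ ['a', 'o', 'y', 'e', 'u', 'i'] then [] else ['.', c]

lemma pv_remove_append {c : Char} {pre rest : List Char} (h : c ∉ pre) :
    PySem.List.remove? (pre ++ c :: rest) c = some (pre ++ rest) := by
  induction pre with
  | nil => simp
  | cons x xs ih =>
    have hx : x ≠ c := by intro he; exact h (by simp [he])
    have hxs : c ∉ xs := fun hm => h (by simp [hm])
    simp [PySem.List.remove?_cons_of_ne _ hx, ih hxs]

lemma pv_get_build (L : List Char) (d : PySem.Dict Char (Option (List Char))) (c : Char) :
    (L.foldl (fun d c =>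
        d.insert c (if c ∈ ['a', 'o', 'y', 'e', 'u', 'i'] then none else some ['.', c])) d).get? c
      = if c ∈ L then some (if c ∈ ['a', 'o', 'y', 'e', 'u', 'i'] then none else some ['.', c])
        else d.get? c := by
  induction L generalizing d with
  | nil => simp
  | cons x xs ih =>
    simp only [List.foldl_cons, ih]
    by_cases hx : c ∈ xs
    · simp [hx]
    · by_cases hcx : c = x
      · subst hcx; simp [hx, PySem.Dict.get?_insert_self]
      · simp [hx, hcx, PySem.Dict.get?_insert_of_ne _ _ hcx]

lemma pv_translate (low : List Char) : pvTranslateB (pvTableB low) low = low.flatMap pvF := by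
  have hstep : ∀ (acc : List Char) (c : Char), c ∈ low →
      (match (pvTableB low).get? c with
       | none => acc ++ [c]
       | some none => acc
       | some (some r) => acc ++ r) = acc ++ pvF c := by
    intro acc c hc
    have hmem : c ∈ PySem.Set.ofList low := by simp [PySem.Set.mem_ofList, hc]
    have hg := pv_get_build (PySem.Set.ofList low) PySem.Dict.empty c
    rw [pvTableB, hg]
    by_cases hv : c ∈ ['a', 'o', 'y', 'e', 'u', 'i'] <;> simp [hmem, hv, pvF]
  unfold pvTranslateB
  rw [PySem.List.foldl_congr_mem low _ (fun acc c => acc ++ pvF c) []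
        (fun acc x hx => hstep acc x hx)]
  exact PySem.List.foldl_append_eq_flatMap pvF low []

lemma pv_A_inv (l : List Char) : ∀ (m j : Nat) (out : List Char), m = l.length - j →
    j ≤ l.length → (∀ c ∈ out, c ∉ ['a', 'o', 'y', 'e', 'u', 'i']) →
    (PySem.List.pyRange (j : Int) (l.length : Int) 1).foldl (pvStepA l)
        (out ++ l.drop j, (out.length : Int) - j)
      = (out ++ (l.drop j).flatMap pvF,
         ((out ++ (l.drop j).flatMap pvF).length : Int) - l.length) := by
  intro m
  induction m with
  | zero =>
    intro j out hm hj hv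
    have hje : j = l.length := by omega
    subst hje
    simp [PySem.List.pyRange_one_eq_nil (le_refl _)]
  | succ n ih =>
    intro j out hm hj hv
    have hjl : j < l.length := by omega
    have hcons : PySem.List.pyRange (j : Int) (l.length : Int) 1
        = (j : Int) :: PySem.List.pyRange ((j : Int) + 1) (l.length : Int) 1 :=
      PySem.List.pyRange_one_cons (by exact_mod_cast hjl)
    set c := l[j]'hjl with hc
    have hdrop : l.drop j = c :: l.drop (j + 1) := (List.getElem_cons_drop hjl).symm
    have hget : PySem.List.pyGet? l (j : Int) = some c := by
      rw [PySem.List.pyGet?_natCast]; simp [hjl, hc]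
    rw [hcons, List.foldl_cons]
    by_cases hvow : c ∈ ['a', 'o', 'y', 'e', 'u', 'i']
    · have hco : c ∉ out := fun h => hv c h hvow
      have hrem : PySem.List.remove? (out ++ l.drop j) c = some (out ++ l.drop (j + 1)) := by
        rw [hdrop]; exact pv_remove_append hco
      have hstep : pvStepA l (out ++ l.drop j, (out.length : Int) - j) (j : Int)
          = (out ++ l.drop (j + 1), (out.length : Int) - (j + 1)) := by
        simp only [pvStepA, hget, hrem, hvow, if_pos, Option.getD_some]
        congr 1
        ring
      rw [hstep]
      have := ih (j + 1) out (by omega) (by omega) hv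
      push_cast at this ⊢
      rw [this, hdrop]
      simp [pvF, hvow]
    · have hlen : out.length ≤ (out ++ l.drop j).length := by simp
      have hidx : (j : Int) + ((out.length : Int) - j) = ((out.length : Nat) : Int) := by ring
      have hins : PySem.List.insert (out ++ l.drop j) ((j : Int) + ((out.length : Int) - j)) '.'
          = out ++ '.' :: l.drop j := by
        rw [hidx, PySem.List.insert_natCast _ _ _ hlen]
        simp
      have hstep : pvStepA l (out ++ l.drop j, (out.length : Int) - j) (j : Int)
          = ((out ++ ['.', c]) ++ l.drop (j + 1),
             ((out ++ ['.', c]).length : Int) - (j + 1)) := by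
        simp only [pvStepA, hget, hvow, ite_false]
        congr 1
        · rw [hins, hdrop]; simp
        · simp only [List.length_append, List.length_cons, List.length_nil]
          push_cast; ring
      rw [hstep]
      have hv' : ∀ x ∈ out ++ ['.', c], x ∉ ['a', 'o', 'y', 'e', 'u', 'i'] := by
        intro x hx
        simp only [List.mem_append, List.mem_cons, List.not_mem_nil, or_false] at hx
        rcases hx with h1 | rfl | rfl
        · exact hv x h1
        · decide
        · exact hvow
      have := ih (j + 1) (out ++ ['.', c]) (by omega) (by omega) hv'
      push_cast at this ⊢
      rw [this, hdrop]
      simp [pvF, hvow]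

-- ===== VERDICT (by name: the statement is the Claim_ definition above) =====
theorem patched_func_spec : Claim_equal_patched_func := by
  intro s _
  unfold Spec_patched_func patched_func patched_func_alt
  have h0 := pv_A_inv (PySem.Str.lower s).toList (PySem.Str.lower s).toList.length 0 []
    (by omega) (by omega) (by intro c h; cases h)
  simp only [List.drop_zero, List.nil_append, List.length_nil, Nat.cast_zero, sub_zero] at h0
  simp only [h0, pv_translate]
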